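-- pv_equiv track=rewrite | github.com/akasai/python-coding | solution/11*.py | solution
-- ===== SOURCE A (Python) =====
-- def solution(string):
--     stack = []
--     ret = 0
--     for s in string:
--         if stack and stack[-1] == s:
--             stack.pop()
--         else:
--             stack.append(s)
--
--     return int(not stack)
-- ===== SOURCE B (Python) =====
-- def solution(string):
--     seq = list(string)
--     while True:
--         out = []
--         i = 0
--         changed = False
--         while i < len(seq):
--             if i + 1 < len(seq) and seq[i] == seq[i + 1]:
--                 i += 2
--                 changed = True
--             else:
--                 out.append(seq[i])
--                 i += 1
--         if not changed:
--             return int(not out)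
--         seq = out
-- ===== Notes on version B (the rewrite author's own statement) =====
-- stated objective: alternative
-- what changed: Replaces the single incremental stack pass by repeated left-to-right scans that drop non-overlapping adjacent equal pairs until a whole pass makes no change.
import Mathlib
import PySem

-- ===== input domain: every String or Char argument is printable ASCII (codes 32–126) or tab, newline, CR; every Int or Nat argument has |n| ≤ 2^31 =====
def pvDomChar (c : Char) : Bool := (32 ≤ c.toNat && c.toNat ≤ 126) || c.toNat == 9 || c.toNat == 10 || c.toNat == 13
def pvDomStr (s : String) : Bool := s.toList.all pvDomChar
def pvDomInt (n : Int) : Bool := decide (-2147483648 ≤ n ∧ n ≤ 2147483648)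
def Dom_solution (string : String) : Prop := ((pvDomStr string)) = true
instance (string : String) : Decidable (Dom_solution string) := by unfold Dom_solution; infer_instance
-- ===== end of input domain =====

-- B replaces A's single incremental stack pass by repeated whole-list scans removing
-- adjacent equal pairs until a pass makes no change; same return value (alternative, not faster).

-- ===== PORT A =====
-- one step of A's loop body: pop if top equals s, else append (stack top = head)
def pvStep (stack : List Char) (s : Char) : List Char :=
  match stack with
  | t :: rest => if t = s then rest else s :: t :: rest
  | [] => [s]

def solution (string : String) : Int :=
  let stack := string.toList.foldl pvStep []
  if stack = [] then 1 else 0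

-- ===== PORT B =====
-- one left-to-right pass of Source B's inner while loop: returns (out, changed)
def pvOnePass : List Char → List Char × Bool
  | a :: b :: l =>
      if a = b then ((pvOnePass l).1, true)
      else
        let r := pvOnePass (b :: l)
        (a :: r.1, r.2)
  | l => (l, false)

theorem pvOnePass_len_le (l : List Char) : (pvOnePass l).1.length ≤ l.length := by
  induction l using pvOnePass.induct with
  | case1 b l ih => simp only [pvOnePass, if_pos rfl]; simp; omega
  | case2 a b l hab ih => simp only [pvOnePass, if_neg hab]; simpa using ih
  | case3 l h => simp [pvOnePass]

theorem pvOnePass_len (l : List Char) :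
    (pvOnePass l).2 = true → (pvOnePass l).1.length < l.length := by
  induction l using pvOnePass.induct with
  | case1 b l ih =>
      intro _
      simp only [pvOnePass, if_pos rfl]
      have := pvOnePass_len_le l
      simp; omega
  | case2 a b l hab ih =>
      intro h
      simp only [pvOnePass, if_neg hab] at h ⊢
      have := ih h
      simp only [List.length_cons] at this ⊢
      omega
  | case3 l h =>
      intro hc
      cases l with
      | nil => simp [pvOnePass] at hc
      | cons x t =>
        cases t with
        | nil => simp [pvOnePass] at hc
        | cons y u => exact absurd rfl (h x y u)

-- Source B's outer while loop
def pvReduceAll (l : List Char) : List Char :=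
  let p := pvOnePass l
  if h : p.2 = true then pvReduceAll p.1 else p.1
termination_by l.length
decreasing_by exact pvOnePass_len l h

def solution_alt (string : String) : Int :=
  if pvReduceAll string.toList = [] then 1 else 0

-- ===== PRECONDITION & SPEC =====
def Spec_solution (string : String) (out : Int) : Prop := out = solution_alt string
instance (string : String) (out : Int) : Decidable (Spec_solution string out) := by unfold Spec_solution; infer_instance

-- ===== CLAIM (what is proved, stated in full; the proofs are below) =====
def Claim_equal_solution : Prop := ∀ (string : String), Dom_solution string → Spec_solution string (solution string)

-- ===== LEMMAS AND PROOFS =====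

-- the stack A maintains never has two equal adjacent elements
theorem pvStep_chain {st : List Char} (h : st.IsChain (· ≠ ·)) (s : Char) :
    (pvStep st s).IsChain (· ≠ ·) := by
  cases st with
  | nil => simp [pvStep]
  | cons t rest =>
    by_cases hts : t = s
    · simp only [pvStep, if_pos hts]
      exact h.tail
    · simp only [pvStep, if_neg hts]
      exact h.cons (by intro y hy; simp at hy; subst hy; exact fun h' => hts h'.symm)

-- feeding an adjacent equal pair to a chain stack is a no-op
theorem pvStep_pair {st : List Char} (h : st.IsChain (· ≠ ·)) (a : Char) :
    pvStep (pvStep st a) a = st := by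
  cases st with
  | nil => simp [pvStep]
  | cons t rest =>
    by_cases hta : t = a
    · subst hta
      simp only [pvStep, if_pos rfl]
      cases rest with
      | nil => simp [pvStep]
      | cons u rest' =>
        have hut : t ≠ u := by
          have := (List.isChain_cons.mp h).1
          simpa using this
        show pvStep (u :: rest') t = t :: u :: rest'
        simp only [pvStep]
        rw [if_neg (Ne.symm hut)]
    · simp [pvStep, hta]

-- one pass of B does not change what A's fold computes from a chain stack
theorem pvFold_onePass (l : List Char) (st : List Char) (h : st.IsChain (· ≠ ·)) :
    (pvOnePass l).1.foldl pvStep st = l.foldl pvStep st := by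
  induction l using pvOnePass.induct generalizing st with
  | case1 a l ih =>
      simp only [pvOnePass, if_pos rfl, List.foldl_cons]
      rw [pvStep_pair h a]
      exact ih st h
  | case2 a b l hab ih =>
      simp only [pvOnePass, if_neg hab, List.foldl_cons]
      exact ih (pvStep st a) (pvStep_chain h a)
  | case3 l hl =>
      cases l with
      | nil => simp [pvOnePass]
      | cons x t =>
        cases t with
        | nil => simp [pvOnePass]
        | cons y u => exact absurd rfl (hl x y u)

-- if a pass reports no change, the list has no adjacent equal pair
theorem pvOnePass_fixed (l : List Char) (h : (pvOnePass l).2 = false) :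
    l.IsChain (· ≠ ·) := by
  induction l using pvOnePass.induct with
  | case1 a l ih => simp [pvOnePass] at h
  | case2 a b l hab ih =>
      simp only [pvOnePass, if_neg hab] at h
      exact (ih h).cons (by simpa using hab)
  | case3 l hl =>
      cases l with
      | nil => simp
      | cons x t =>
        cases t with
        | nil => simp
        | cons y u => exact absurd rfl (hl x y u)

theorem pvOnePass_fixed_eq (l : List Char) (h : (pvOnePass l).2 = false) :
    (pvOnePass l).1 = l := by
  induction l using pvOnePass.induct with
  | case1 a l ih => simp [pvOnePass] at h
  | case2 a b l hab ih =>
      simp only [pvOnePass, if_neg hab] at h ⊢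
      simp [ih h]
  | case3 l hl => simp [pvOnePass]

-- B's final list, fed to A's fold, gives the same stack as the original input
theorem pvFold_reduceAll (l : List Char) :
    (pvReduceAll l).foldl pvStep [] = l.foldl pvStep [] := by
  induction l using pvReduceAll.induct with
  | case1 l p h ih =>
      rw [pvReduceAll]
      rw [dif_pos h]
      rw [ih, pvFold_onePass l [] (by simp)]
  | case2 l p h =>
      rw [pvReduceAll]
      rw [dif_neg h]
      rw [pvOnePass_fixed_eq l (by simpa using h)]

-- B's final list has no adjacent equal pair
theorem pvReduceAll_chain (l : List Char) : (pvReduceAll l).IsChain (· ≠ ·) := by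
  induction l using pvReduceAll.induct with
  | case1 l p h ih => rw [pvReduceAll]; rw [dif_pos h]; exact ih
  | case2 l p h =>
      rw [pvReduceAll]; rw [dif_neg h]
      rw [pvOnePass_fixed_eq l (by simpa using h)]
      exact pvOnePass_fixed l (by simpa using h)

-- A's fold on a chain list just reverses it onto the stack
theorem pvFold_of_chain (r : List Char) (st : List Char)
    (h : (r.reverse ++ st).IsChain (· ≠ ·)) :
    r.foldl pvStep st = r.reverse ++ st := by
  induction r generalizing st with
  | nil => simp
  | cons a r ih =>
    simp only [List.reverse_cons, List.append_assoc, List.singleton_append] at h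
    have hsuf : (a :: st).IsChain (· ≠ ·) := (List.isChain_append.mp h).2.1
    have hstep : pvStep st a = a :: st := by
      cases st with
      | nil => simp [pvStep]
      | cons t rest =>
        have hat : a ≠ t := by
          have := (List.isChain_cons.mp hsuf).1
          simpa using this
        simp only [pvStep]
        rw [if_neg (Ne.symm hat)]
    simp only [List.foldl_cons, hstep]
    rw [ih (a :: st) h]
    simp
theorem pvMain (l : List Char) : l.foldl pvStep [] = (pvReduceAll l).reverse := by
  rw [← pvFold_reduceAll]
  have hc : ((pvReduceAll l).reverse ++ ([] : List Char)).IsChain (· ≠ ·) := by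
    simp only [List.append_nil]
    exact List.isChain_reverse.mpr (by
      have := pvReduceAll_chain l
      exact this.imp fun a b h => h.symm)
  simpa using pvFold_of_chain (pvReduceAll l) [] hc

-- ===== VERDICT (by name: the statement is the Claim_ definition above) =====
theorem solution_spec : Claim_equal_solution := by
  intro s _
  unfold Spec_solution solution solution_alt
  rw [pvMain]
  simp
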